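-- pv_equiv track=rewrite | github.com/GrimFandango42/VoiceFlow | core/ai_enhancement.py | _format_basic_general
-- ===== SOURCE A (Python) =====
-- def _format_basic_general(text: str) -> str:
--     """Format text for general contexts."""
--     # Capitalize first letter
--     if text:
--         text = text[0].upper() + text[1:]
--
--     # Add period if missing
--     if text and text[-1] not in '.!?':
--         text += '.'
--
--     # Basic replacements for common speech patterns
--     replacements = {
--         ' new line': '\n',
--         ' new paragraph': '\n\n',
--         ' period': '.',
--         ' comma': ',',
--         ' question mark': '?',
--         ' exclamation mark': '!',
--         'scratch that': '',  # Remove this phrase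
--     }
--
--     for pattern, replacement in replacements.items():
--         text = text.replace(pattern, replacement)
--
--     return text.strip()
-- ===== SOURCE B (Python) =====
-- _REPLACEMENTS = (
--     (' new line', '\n'),
--     (' new paragraph', '\n\n'),
--     (' period', '.'),
--     (' comma', ','),
--     (' question mark', '?'),
--     (' exclamation mark', '!'),
--     ('scratch that', ''),
-- )
--
--
-- def _format_basic_general(text: str) -> str:
--     """Format text for general contexts (single left-to-right scan)."""
--     if text:
--         text = text[0].upper() + text[1:]
--     if text and text[-1] not in '.!?':
--         text += '.'
--     out = []
--     i = 0
--     n = len(text)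
--     while i < n:
--         for pattern, replacement in _REPLACEMENTS:
--             if text.startswith(pattern, i):
--                 out.append(replacement)
--                 i += len(pattern)
--                 break
--         else:
--             out.append(text[i])
--             i += 1
--     return ''.join(out).strip()
-- ===== Notes on version B (the rewrite author's own statement) =====
-- stated objective: alternative
-- what changed: The seven sequential whole-string str.replace passes are replaced by a single left-to-right scan that at each position tries the patterns in order, emits the matching replacement and skips past it (equivalent because no replacement output can create or destroy another pattern occurrence); the capitalize/period/strip steps are unchanged.
import Mathlib
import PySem

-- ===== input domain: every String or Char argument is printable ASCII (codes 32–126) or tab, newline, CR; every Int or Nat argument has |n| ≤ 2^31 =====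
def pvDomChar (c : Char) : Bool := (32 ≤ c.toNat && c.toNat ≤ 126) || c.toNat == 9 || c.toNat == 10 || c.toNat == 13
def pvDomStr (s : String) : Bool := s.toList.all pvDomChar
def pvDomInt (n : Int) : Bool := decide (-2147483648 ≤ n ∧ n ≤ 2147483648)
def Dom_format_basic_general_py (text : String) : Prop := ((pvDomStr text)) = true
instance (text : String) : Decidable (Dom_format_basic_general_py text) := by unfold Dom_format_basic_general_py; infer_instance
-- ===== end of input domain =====

-- B replaces A's seven sequential str.replace passes by a single left-to-right scan that
-- tries the patterns in order at each position (objective: alternative, one pass instead of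
-- seven; the capitalize / add-period / strip steps are unchanged).

-- ===== PORT A =====
-- the literal dict `replacements`, in insertion order
def pvAReplacements : List (List Char × List Char) :=
  [(" new line".toList, "\n".toList),
   (" new paragraph".toList, "\n\n".toList),
   (" period".toList, ".".toList),
   (" comma".toList, ",".toList),
   (" question mark".toList, "?".toList),
   (" exclamation mark".toList, "!".toList),
   ("scratch that".toList, "".toList)]

def format_basic_general_py (text : String) : String :=
  let t0 : List Char := text.toList
  -- if text: text = text[0].upper() + text[1:]
  let t1 : List Char :=
    match t0 with
    | [] => t0
    | c :: rest => PySem.Chars.upperChar c :: rest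
  -- if text and text[-1] not in '.!?': text += '.'
  let t2 : List Char :=
    match PySem.List.pyGet? t1 (-1 : Int) with
    | none => t1
    | some c => if PySem.Chars.isIn [c] ('.' :: '!' :: '?' :: []) then t1 else t1 ++ ['.']
  -- for pattern, replacement in replacements.items(): text = text.replace(pattern, replacement)
  let t3 : List Char := pvAReplacements.foldl (fun s pr => PySem.Chars.replace s pr.1 pr.2) t2
  String.mk (PySem.Chars.strip t3)

-- ===== PORT B =====
-- the module-level tuple _REPLACEMENTS
def pvBReplacements : List (List Char × List Char) :=
  [(" new line".toList, "\n".toList),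
   (" new paragraph".toList, "\n\n".toList),
   (" period".toList, ".".toList),
   (" comma".toList, ",".toList),
   (" question mark".toList, "?".toList),
   (" exclamation mark".toList, "!".toList),
   ("scratch that".toList, "".toList)]

-- the inner `for pattern, replacement in _REPLACEMENTS: if text.startswith(pattern, i): … break / else: …`
def pvBTry : List (List Char × List Char) → List Char → Option (List Char × List Char)
  | [], _ => none
  | pr :: rest, s => if pr.1.isPrefixOf s then some pr else pvBTry rest s

-- termination helpers for the scan: a hit returned by pvBTry is one of the seven patterns, all nonempty
theorem pvBTry_mem : ∀ (ps : List (List Char × List Char)) (s : List Char) (pr : List Char × List Char),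
    pvBTry ps s = some pr → pr ∈ ps ∧ pr.1.isPrefixOf s = true := by
  intro ps
  induction ps with
  | nil => intro s pr h; simp [pvBTry] at h
  | cons q rest ih =>
    intro s pr h
    rw [pvBTry] at h
    by_cases hq : q.1.isPrefixOf s
    · rw [if_pos hq] at h
      cases h
      exact ⟨List.mem_cons_self, hq⟩
    · rw [if_neg hq] at h
      obtain ⟨hm, hp⟩ := ih s pr h
      exact ⟨List.mem_cons_of_mem _ hm, hp⟩

set_option maxRecDepth 16384 in
theorem pvBTry_pos (s : List Char) (pr : List Char × List Char)
    (h : pvBTry pvBReplacements s = some pr) : 0 < pr.1.length := by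
  have hm := (pvBTry_mem pvBReplacements s pr h).1
  fin_cases hm <;> decide

-- the `while i < n` scan: emit the first matching replacement and skip the pattern, else copy one char
def pvBScan : List Char → List Char
  | [] => []
  | c :: t =>
    match h : pvBTry pvBReplacements (c :: t) with
    | some pr => pr.2 ++ pvBScan ((c :: t).drop pr.1.length)
    | none => c :: pvBScan t
termination_by s => s.length
decreasing_by
  · have := pvBTry_pos _ _ h
    simp
    omega
  · simp

def format_basic_general_py_alt (text : String) : String :=
  let t0 : List Char := text.toList
  -- if text: text = text[0].upper() + text[1:]
  let t1 : List Char :=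
    match t0 with
    | [] => t0
    | c :: rest => PySem.Chars.upperChar c :: rest
  -- if text and text[-1] not in '.!?': text += '.'
  let t2 : List Char :=
    match PySem.List.pyGet? t1 (-1 : Int) with
    | none => t1
    | some c => if PySem.Chars.isIn [c] ('.' :: '!' :: '?' :: []) then t1 else t1 ++ ['.']
  -- single scan, then ''.join(out).strip()
  String.mk (PySem.Chars.strip (pvBScan t2))

-- ===== PRECONDITION & SPEC =====
def Spec_format_basic_general_py (text : String) (out : String) : Prop := out = format_basic_general_py_alt text
instance (text : String) (out : String) : Decidable (Spec_format_basic_general_py text out) := by unfold Spec_format_basic_general_py; infer_instance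

-- ===== CLAIM (what is proved, stated in full; the proofs are below) =====
def Claim_equal_format_basic_general_py : Prop := ∀ (text : String), Dom_format_basic_general_py text → Spec_format_basic_general_py text (format_basic_general_py text)

-- ===== LEMMAS AND PROOFS =====

-- structural model of Python's str.replace (leftmost, non-overlapping), for a nonempty pattern
def pvRepl (old new : List Char) : List Char → List Char
  | [] => []
  | c :: t =>
    if old.isPrefixOf (c :: t) then new ++ pvRepl old new (t.drop (old.length - 1))
    else c :: pvRepl old new t
termination_by l => l.length
decreasing_by
  · simpa using Nat.lt_succ_of_le (List.length_drop_le _ _)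
  · simp

theorem pvGo_eq (old new : List Char) (h : old ≠ []) :
    ∀ fuel (l acc : List Char), l.length ≤ fuel →
      PySem.Chars.replace.go old new fuel l acc = acc.reverse ++ pvRepl old new l := by
  intro fuel
  induction fuel with
  | zero =>
    intro l acc hl
    have : l = [] := List.eq_nil_of_length_eq_zero (Nat.le_zero.mp hl)
    subst this
    simp [PySem.Chars.replace.go, pvRepl]
  | succ n ih =>
    intro l acc hl
    cases l with
    | nil => simp [PySem.Chars.replace.go, pvRepl]
    | cons c t =>
      rw [PySem.Chars.replace.go]
      by_cases hp : old.isPrefixOf (c :: t)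
      · obtain ⟨o, os, rfl⟩ : ∃ o os, old = o :: os := by
          cases old with
          | nil => exact absurd rfl h
          | cons o os => exact ⟨o, os, rfl⟩
        rw [if_pos hp, ih _ _ (by simp at hl ⊢; omega)]
        rw [pvRepl, if_pos hp]
        simp
      · rw [if_neg hp, ih _ _ (by simp at hl ⊢; omega)]
        rw [pvRepl, if_neg hp]
        simp

theorem replace_eq_pvRepl (old new : List Char) (h : old ≠ []) (s : List Char) :
    PySem.Chars.replace s old new = pvRepl old new s := by
  rw [PySem.Chars.replace, if_neg (by simpa using h)]
  simpa using pvGo_eq old new h s.length s [] le_rfl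

-- pvRepl on a string beginning with the pattern
theorem pvRepl_fire (old new : List Char) (h : old ≠ []) {l : List Char} (hp : old <+: l) :
    pvRepl old new l = new ++ pvRepl old new (l.drop old.length) := by
  cases l with
  | nil =>
    exact absurd (List.prefix_nil.mp hp) h
  | cons c t =>
    obtain ⟨o, os, rfl⟩ : ∃ o os, old = o :: os := by
      cases old with
      | nil => exact absurd rfl h
      | cons o os => exact ⟨o, os, rfl⟩
    rw [pvRepl, if_pos (List.isPrefixOf_iff_prefix.mpr hp)]
    simp

-- pvRepl steps over a position where the pattern does not match
theorem pvRepl_step (old new : List Char) (c : Char) (t : List Char) (hp : ¬ old <+: (c :: t)) :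
    pvRepl old new (c :: t) = c :: pvRepl old new t := by
  rw [pvRepl, if_neg (fun hb => hp (List.isPrefixOf_iff_prefix.mp hb))]

-- pvRepl steps over a whole block no occurrence of the pattern can start in or straddle
theorem pvRepl_stepOver (old new : List Char) (pre : List Char)
    (h : ∀ k, k < pre.length → ¬ (pre.drop k <+: old) ∧ ¬ (old <+: pre.drop k)) :
    ∀ u, pvRepl old new (pre ++ u) = pre ++ pvRepl old new u := by
  induction pre with
  | nil => intro u; simp
  | cons c pre ih =>
    intro u
    have h0 := h 0 (by simp)
    simp only [List.drop_zero] at h0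
    have hnp : ¬ old <+: (c :: pre) ++ u := by
      intro hp
      rcases List.prefix_or_prefix_of_prefix hp (List.prefix_append (c :: pre) u) with h' | h'
      · exact h0.2 h'
      · exact h0.1 h'
    rw [List.cons_append, pvRepl_step old new c (pre ++ u) hnp,
      ih (fun k hk => by simpa using h (k + 1) (by simpa using Nat.succ_lt_succ hk)) u]
    simp

-- a pattern none of whose characters come from `new` that is a prefix after pvRepl was a prefix before
theorem pref_pvRepl (old new q : List Char) (hold : old ≠ []) (hnew : new ≠ [])
    (hdisj : ∀ a ∈ new, a ∉ q) : ∀ u, q <+: pvRepl old new u → q <+: u := by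
  intro u
  induction u generalizing q with
  | nil =>
    intro hq
    rw [pvRepl] at hq
    exact hq
  | cons c t ih =>
    intro hq
    by_cases hp : old <+: (c :: t)
    · rw [pvRepl_fire old new hold hp] at hq
      cases q with
      | nil => exact List.nil_prefix
      | cons a q' =>
        obtain ⟨b, ns, rfl⟩ : ∃ b ns, new = b :: ns := by
          cases new with
          | nil => exact absurd rfl hnew
          | cons b ns => exact ⟨b, ns, rfl⟩
        rw [List.cons_append] at hq
        obtain ⟨rfl, -⟩ := List.cons_prefix_cons.mp hq
        exact absurd List.mem_cons_self (hdisj a List.mem_cons_self)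
    · rw [pvRepl_step old new c t hp] at hq
      cases q with
      | nil => exact List.nil_prefix
      | cons a q' =>
        obtain ⟨rfl, hq'⟩ := List.cons_prefix_cons.mp hq
        exact List.cons_prefix_cons.mpr
          ⟨rfl, ih q' (fun x hx hxq => hdisj x hx (List.mem_cons_of_mem _ hxq)) hq'⟩

theorem pref_cons_pvRepl (old new q : List Char) (c : Char) (u : List Char) (hold : old ≠ [])
    (hnew : new ≠ []) (hdisj : ∀ a ∈ new, a ∉ q)
    (hq : q <+: c :: pvRepl old new u) : q <+: c :: u := by
  cases q with
  | nil => exact List.nil_prefix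
  | cons a q' =>
    obtain ⟨rfl, hq'⟩ := List.cons_prefix_cons.mp hq
    exact List.cons_prefix_cons.mpr
      ⟨rfl, pref_pvRepl old new q' hold hnew
        (fun x hx hxq => hdisj x hx (List.mem_cons_of_mem _ hxq)) u hq'⟩

-- the sequential passes, as a fold of pvRepl
def pvFold (ps : List (List Char × List Char)) (l : List Char) : List Char :=
  ps.foldl (fun s pr => pvRepl pr.1 pr.2 s) l

-- chain condition: patterns nonempty, and no replacement character occurs in a LATER pattern
def pvGood : List (List Char × List Char) → Prop
  | [] => True
  | (p, r) :: ps => p ≠ [] ∧ (∀ pr ∈ ps, r ≠ [] ∧ ∀ a ∈ r, a ∉ pr.1) ∧ pvGood ps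

theorem pvFold_cons : ∀ (ps : List (List Char × List Char)) (c : Char) (t : List Char),
    pvGood ps → (∀ pr ∈ ps, ¬ pr.1 <+: c :: t) →
    pvFold ps (c :: t) = c :: pvFold ps t := by
  intro ps
  induction ps with
  | nil => intro c t _ _; rfl
  | cons pr ps ih =>
    intro c t hg h
    obtain ⟨p, r⟩ := pr
    obtain ⟨hp0, hlater, hg'⟩ := hg
    simp only [pvFold, List.foldl_cons]
    rw [pvRepl_step p r c t (h (p, r) List.mem_cons_self)]
    exact ih c (pvRepl p r t) hg' (fun q hq hpre =>
      h q (List.mem_cons_of_mem _ hq)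
        (pref_cons_pvRepl p r q.1 c t hp0 (hlater q hq).1 (hlater q hq).2 hpre))

theorem pvFold_stepOver : ∀ (ps : List (List Char × List Char)) (pre : List Char),
    (∀ pr ∈ ps, ∀ k, k < pre.length → ¬ (pre.drop k <+: pr.1) ∧ ¬ (pr.1 <+: pre.drop k)) →
    ∀ u, pvFold ps (pre ++ u) = pre ++ pvFold ps u := by
  intro ps
  induction ps with
  | nil => intro pre _ u; rfl
  | cons pr ps ih =>
    intro pre h u
    simp only [pvFold, List.foldl_cons]
    rw [pvRepl_stepOver pr.1 pr.2 pre (h pr List.mem_cons_self)]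
    exact ih pre (fun q hq => h q (List.mem_cons_of_mem _ hq)) (pvRepl pr.1 pr.2 u)

-- firing the i-th pattern: earlier passes step over the pattern, later passes step over its replacement
theorem pvFold_fire (pre post : List (List Char × List Char)) (p r : List Char) (hp : p ≠ [])
    (h1 : ∀ pr ∈ pre, ∀ k, k < p.length → ¬ (p.drop k <+: pr.1) ∧ ¬ (pr.1 <+: p.drop k))
    (h2 : ∀ pr ∈ post, ∀ k, k < r.length → ¬ (r.drop k <+: pr.1) ∧ ¬ (pr.1 <+: r.drop k)) :
    ∀ u, pvFold (pre ++ (p, r) :: post) (p ++ u) = r ++ pvFold (pre ++ (p, r) :: post) u := by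
  intro u
  have e1 : pvFold (pre ++ (p, r) :: post) (p ++ u) = pvFold post (pvRepl p r (pvFold pre (p ++ u))) := by
    simp [pvFold, List.foldl_append]
  have e2 : pvFold (pre ++ (p, r) :: post) u = pvFold post (pvRepl p r (pvFold pre u)) := by
    simp [pvFold, List.foldl_append]
  rw [e1, e2, pvFold_stepOver pre p h1 u,
    pvRepl_fire p r hp (List.prefix_append p (pvFold pre u)), List.drop_left,
    pvFold_stepOver post r h2 (pvRepl p r (pvFold pre u))]

-- scan equations
theorem pvBScan_hit (c : Char) (t : List Char) (pr : List Char × List Char)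
    (h : pvBTry pvBReplacements (c :: t) = some pr) :
    pvBScan (c :: t) = pr.2 ++ pvBScan ((c :: t).drop pr.1.length) := by
  rw [pvBScan]
  split
  · rename_i pr' h'
    rw [h] at h'
    cases h'
    rfl
  · rename_i h'
    rw [h] at h'
    cases h'

theorem pvBScan_miss (c : Char) (t : List Char)
    (h : pvBTry pvBReplacements (c :: t) = none) :
    pvBScan (c :: t) = c :: pvBScan t := by
  rw [pvBScan]
  split
  · rename_i pr' h'
    rw [h] at h'
    cases h'
  · rfl

theorem pvBTry_none : ∀ (ps : List (List Char × List Char)) (s : List Char),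
    pvBTry ps s = none → ∀ pr ∈ ps, ¬ pr.1 <+: s := by
  intro ps
  induction ps with
  | nil => intro s _ pr hm; simp at hm
  | cons q rest ih =>
    intro s h pr hm
    rw [pvBTry] at h
    by_cases hq : q.1.isPrefixOf s
    · rw [if_pos hq] at h; cases h
    · rw [if_neg hq] at h
      rcases List.mem_cons.mp hm with rfl | hm'
      · exact fun hpre => hq (List.isPrefixOf_iff_prefix.mpr hpre)
      · exact ih s h pr hm'

theorem pvRepl_nil (old new : List Char) : pvRepl old new [] = [] := by rw [pvRepl]

theorem pvFold_nil : ∀ ps : List (List Char × List Char), pvFold ps [] = [] := by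
  intro ps
  induction ps with
  | nil => rfl
  | cons pr ps ih =>
    simp only [pvFold, List.foldl_cons, pvRepl_nil]
    exact ih

-- Bool-computable bridges for the concrete side conditions (List.decidableBAll does not evaluate here)
theorem ball_not_mem_of_all {r q : List Char} (h : r.all (fun a => !(decide (a ∈ q))) = true) :
    ∀ a ∈ r, a ∉ q := by
  intro a ha
  simpa using List.all_eq_true.mp h a ha

theorem cond_of_all {old pre : List Char}
    (h : (List.range pre.length).all
      (fun k => !((pre.drop k).isPrefixOf old) && !(old.isPrefixOf (pre.drop k))) = true) :
    ∀ k, k < pre.length → ¬ (pre.drop k <+: old) ∧ ¬ (old <+: pre.drop k) := by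
  intro k hk
  have h' := List.all_eq_true.mp h k (List.mem_range.mpr hk)
  rw [Bool.and_eq_true] at h'
  constructor
  · intro hp
    rw [List.isPrefixOf_iff_prefix.mpr hp] at h'
    simp at h'
  · intro hp
    rw [List.isPrefixOf_iff_prefix.mpr hp] at h'
    simp at h'

set_option maxRecDepth 16384 in
theorem pvGood_A : pvGood pvAReplacements := by
  unfold pvAReplacements
  refine ⟨by decide, ?_, by decide, ?_, by decide, ?_, by decide, ?_, by decide, ?_,
    by decide, ?_, by decide, ?_, trivial⟩ <;>
    · intro pr hm
      fin_cases hm <;> exact ⟨by decide, ball_not_mem_of_all (by decide)⟩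

-- the main equivalence: seven sequential passes = one ordered scan
set_option maxRecDepth 16384 in
theorem pvFold_eq_pvBScan : ∀ (n : Nat) (l : List Char), l.length ≤ n →
    pvFold pvAReplacements l = pvBScan l := by
  intro n
  induction n with
  | zero =>
    intro l hl
    have : l = [] := List.eq_nil_of_length_eq_zero (Nat.le_zero.mp hl)
    subst this
    rw [pvFold_nil, pvBScan]
  | succ n ih =>
    intro l hl
    cases l with
    | nil => rw [pvFold_nil, pvBScan]
    | cons c t =>
      cases h : pvBTry pvBReplacements (c :: t) with
      | none =>
        have hmiss := pvBTry_none pvBReplacements (c :: t) h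
        rw [pvBScan_miss c t h, ← ih t (by simp at hl; omega)]
        exact pvFold_cons pvAReplacements c t pvGood_A
          (fun pr hm => hmiss pr hm)
      | some pr =>
        obtain ⟨hm, hpb⟩ := pvBTry_mem pvBReplacements (c :: t) pr h
        have hpre : pr.1 <+: c :: t := List.isPrefixOf_iff_prefix.mp hpb
        obtain ⟨u, hu⟩ := hpre
        have hlen : u.length ≤ n := by
          have h1 : 0 < pr.1.length := pvBTry_pos _ _ h
          have := congrArg List.length hu
          simp at this hl
          omega
        have hdrop : (c :: t).drop pr.1.length = u := by
          rw [← hu, List.drop_left]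
        rw [pvBScan_hit c t pr h, hdrop, ← ih u hlen, ← hu]
        fin_cases hm
        · exact pvFold_fire [] _ _ _ (by decide) (by intro pr hm; fin_cases hm) (by intro pr hm; fin_cases hm <;> exact cond_of_all (by decide)) u
        · exact pvFold_fire [(" new line".toList, "\n".toList)] _ _ _ (by decide) (by intro pr hm; fin_cases hm <;> exact cond_of_all (by decide)) (by intro pr hm; fin_cases hm <;> exact cond_of_all (by decide)) u
        · exact pvFold_fire [(" new line".toList, "\n".toList),
            (" new paragraph".toList, "\n\n".toList)] _ _ _ (by decide) (by intro pr hm; fin_cases hm <;> exact cond_of_all (by decide)) (by intro pr hm; fin_cases hm <;> exact cond_of_all (by decide)) u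
        · exact pvFold_fire [(" new line".toList, "\n".toList),
            (" new paragraph".toList, "\n\n".toList), (" period".toList, ".".toList)] _ _ _
            (by decide) (by intro pr hm; fin_cases hm <;> exact cond_of_all (by decide)) (by intro pr hm; fin_cases hm <;> exact cond_of_all (by decide)) u
        · exact pvFold_fire [(" new line".toList, "\n".toList),
            (" new paragraph".toList, "\n\n".toList), (" period".toList, ".".toList),
            (" comma".toList, ",".toList)] _ _ _ (by decide) (by intro pr hm; fin_cases hm <;> exact cond_of_all (by decide)) (by intro pr hm; fin_cases hm <;> exact cond_of_all (by decide)) u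
        · exact pvFold_fire [(" new line".toList, "\n".toList),
            (" new paragraph".toList, "\n\n".toList), (" period".toList, ".".toList),
            (" comma".toList, ",".toList), (" question mark".toList, "?".toList)] _ _ _
            (by decide) (by intro pr hm; fin_cases hm <;> exact cond_of_all (by decide)) (by intro pr hm; fin_cases hm <;> exact cond_of_all (by decide)) u
        · exact pvFold_fire [(" new line".toList, "\n".toList),
            (" new paragraph".toList, "\n\n".toList), (" period".toList, ".".toList),
            (" comma".toList, ",".toList), (" question mark".toList, "?".toList),
            (" exclamation mark".toList, "!".toList)] _ _ _ (by decide) (by intro pr hm; fin_cases hm <;> exact cond_of_all (by decide)) (by intro pr hm; fin_cases hm) u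

theorem pvAFold_eq (l : List Char) :
    pvAReplacements.foldl (fun s pr => PySem.Chars.replace s pr.1 pr.2) l = pvBScan l := by
  have : pvAReplacements.foldl (fun s pr => PySem.Chars.replace s pr.1 pr.2) l
      = pvFold pvAReplacements l := by
    simp only [pvAReplacements, pvFold, List.foldl_cons, List.foldl_nil]
    rw [replace_eq_pvRepl " new line".toList "\n".toList (by decide),
      replace_eq_pvRepl " new paragraph".toList "\n\n".toList (by decide),
      replace_eq_pvRepl " period".toList ".".toList (by decide),
      replace_eq_pvRepl " comma".toList ",".toList (by decide),
      replace_eq_pvRepl " question mark".toList "?".toList (by decide),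
      replace_eq_pvRepl " exclamation mark".toList "!".toList (by decide),
      replace_eq_pvRepl "scratch that".toList "".toList (by decide)]
  rw [this, pvFold_eq_pvBScan l.length l le_rfl]

-- ===== VERDICT (by name: the statement is the Claim_ definition above) =====
theorem format_basic_general_py_spec : Claim_equal_format_basic_general_py := by
  intro text _
  unfold Spec_format_basic_general_py format_basic_general_py format_basic_general_py_alt
  exact congrArg (fun l => String.mk (PySem.Chars.strip l)) (pvAFold_eq _)
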